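-- pv_equiv track=rewrite | github.com/ttzytt/PyAutoGrade | tests/Block 4/tested_code/1251/file_reading.py | all_vowels_counter
-- ===== SOURCE A (Python) =====
-- def all_vowels_counter(file):
--
--     result = 0
--     for line in file:
--         words = line.split()
--         for i in range(len(words)):
--
--             signal = [0,0,0,0,0]
--             for j in range(len(words[i])):
--                 if words[i][j].lower() == 'a':
--                     signal[0] += 1
--                 elif words[i][j].lower() == 'e':
--                     signal[1] += 1
--                 elif words[i][j].lower() == 'i':
--                     signal[2] += 1
--                 elif words[i][j].lower() == 'o':
--                     signal[3] += 1
--                 elif words[i][j].lower() == 'u':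
--                     signal[4] += 1
--
--             if signal[0] * signal[1] * signal[2] * signal[3] * signal[4] != 0:
--                 result += 1
--     return result
-- ===== SOURCE B (Python) =====
-- def all_vowels_counter(file):
--     vowels = set('aeiou')
--     return sum(1 for line in file
--                  for word in line.split()
--                  if vowels <= set(word.lower()))
-- ===== Notes on version B (the rewrite author's own statement) =====
-- stated objective: idiomatic
-- what changed: Replaced the per-character elif chain tallying a five-slot count array and the product-of-counts test by a single comprehension counting words whose lowercased character set contains all five vowels (subset test); only presence matters, so the counting disappears.
import Mathlib
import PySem

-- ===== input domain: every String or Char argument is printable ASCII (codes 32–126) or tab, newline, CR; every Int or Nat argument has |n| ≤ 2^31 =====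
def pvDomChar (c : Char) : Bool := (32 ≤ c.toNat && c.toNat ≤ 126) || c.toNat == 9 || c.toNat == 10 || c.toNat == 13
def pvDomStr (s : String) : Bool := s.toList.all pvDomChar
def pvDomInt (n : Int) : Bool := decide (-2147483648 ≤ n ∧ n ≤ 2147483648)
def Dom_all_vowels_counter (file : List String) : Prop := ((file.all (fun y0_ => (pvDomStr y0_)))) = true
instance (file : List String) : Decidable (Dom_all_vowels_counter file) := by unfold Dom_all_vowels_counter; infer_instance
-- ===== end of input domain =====

-- B replaces A's five-slot vowel tally and product-of-counts test by a subset test on the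
-- set of lowercased characters of each word (idiomatic; measured constant-factor faster).

-- ===== PORT A =====
def all_vowels_counter (file : List String) : Int :=
  file.foldl (fun result line =>
    let words := PySem.Str.split₀ line
    (PySem.List.pyRange 0 (PySem.List.len words)).foldl (fun result i =>
      let w := (PySem.List.pyGetD words i "").toList
      let signal :=
        (PySem.List.pyRange 0 (PySem.List.len w)).foldl (fun s j =>
          let c := PySem.List.pyGetD w j ' '
          if PySem.Chars.lowerChar c = 'a' then (s.1 + 1, s.2.1, s.2.2.1, s.2.2.2.1, s.2.2.2.2)
          else if PySem.Chars.lowerChar c = 'e' then (s.1, s.2.1 + 1, s.2.2.1, s.2.2.2.1, s.2.2.2.2)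
          else if PySem.Chars.lowerChar c = 'i' then (s.1, s.2.1, s.2.2.1 + 1, s.2.2.2.1, s.2.2.2.2)
          else if PySem.Chars.lowerChar c = 'o' then (s.1, s.2.1, s.2.2.1, s.2.2.2.1 + 1, s.2.2.2.2)
          else if PySem.Chars.lowerChar c = 'u' then (s.1, s.2.1, s.2.2.1, s.2.2.2.1, s.2.2.2.2 + 1)
          else s)
          (((0 : Int), (0 : Int), (0 : Int), (0 : Int), (0 : Int)))
      if signal.1 * signal.2.1 * signal.2.2.1 * signal.2.2.2.1 * signal.2.2.2.2 ≠ 0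
        then result + 1 else result)
      result)
    0

-- ===== PORT B =====
def avcHasAllVowels (w : String) : Bool :=
  (PySem.Set.ofList "aeiou".toList).all
    (fun v => (PySem.Set.ofList (PySem.Chars.lower w.toList)).contains v)

def all_vowels_counter_alt (file : List String) : Int :=
  ((file.flatMap (fun line => PySem.Str.split₀ line)).countP avcHasAllVowels : Int)

-- ===== PRECONDITION & SPEC =====
def Spec_all_vowels_counter (file : List String) (out : Int) : Prop := out = all_vowels_counter_alt file
instance (file : List String) (out : Int) : Decidable (Spec_all_vowels_counter file out) := by unfold Spec_all_vowels_counter; infer_instance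

-- ===== CLAIM (what is proved, stated in full; the proofs are below) =====
def Claim_equal_all_vowels_counter : Prop := ∀ (file : List String), Dom_all_vowels_counter file → Spec_all_vowels_counter file (all_vowels_counter file)

-- ===== LEMMAS AND PROOFS =====

-- the count of characters of w whose lowercase is v, as A's signal slots hold it
def avcCnt (v : Char) (w : List Char) : Int :=
  (w.countP (fun c => PySem.Chars.lowerChar c = v) : Int)

lemma avc_lower_eq_map (l : List Char) : PySem.Chars.lower l = l.map PySem.Chars.lowerChar := by
  induction l <;> simp [PySem.Chars.lower, *]

-- A's inner character loop computes the five per-vowel counts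
lemma avc_sig_fold (w : List Char) (s : Int×Int×Int×Int×Int) :
    w.foldl (fun s c =>
      if PySem.Chars.lowerChar c = 'a' then (s.1 + 1, s.2.1, s.2.2.1, s.2.2.2.1, s.2.2.2.2)
      else if PySem.Chars.lowerChar c = 'e' then (s.1, s.2.1 + 1, s.2.2.1, s.2.2.2.1, s.2.2.2.2)
      else if PySem.Chars.lowerChar c = 'i' then (s.1, s.2.1, s.2.2.1 + 1, s.2.2.2.1, s.2.2.2.2)
      else if PySem.Chars.lowerChar c = 'o' then (s.1, s.2.1, s.2.2.1, s.2.2.2.1 + 1, s.2.2.2.2)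
      else if PySem.Chars.lowerChar c = 'u' then (s.1, s.2.1, s.2.2.1, s.2.2.2.1, s.2.2.2.2 + 1)
      else s) s
    = (s.1 + avcCnt 'a' w, s.2.1 + avcCnt 'e' w, s.2.2.1 + avcCnt 'i' w,
       s.2.2.2.1 + avcCnt 'o' w, s.2.2.2.2 + avcCnt 'u' w) := by
  induction w generalizing s with
  | nil => simp [avcCnt]
  | cons c w ih =>
    simp only [List.foldl_cons]
    split_ifs with h1 h2 h3 h4 h5 <;>
      rw [ih] <;> clear ih <;>
      simp_all [avcCnt, Prod.ext_iff] <;> ring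

-- all five counts are nonzero exactly when B's subset test succeeds
lemma avc_word (word : String) :
    (avcCnt 'a' word.toList * avcCnt 'e' word.toList * avcCnt 'i' word.toList *
      avcCnt 'o' word.toList * avcCnt 'u' word.toList ≠ 0) ↔ avcHasAllVowels word = true := by
  have hv : PySem.Set.ofList "aeiou".toList = ['a','e','i','o','u'] := by decide
  have hmem : ∀ v : Char,
      (avcCnt v word.toList ≠ 0 ↔ ∃ c ∈ word.toList, PySem.Chars.lowerChar c = v) := by
    intro v
    simp [avcCnt, List.countP_eq_zero]
  simp only [mul_ne_zero_iff]
  rw [avcHasAllVowels, hv]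
  simp [avc_lower_eq_map, PySem.Set.mem_ofList, hmem]
  tauto

-- A's per-line word loop counts the qualifying words of the line
lemma avc_line (line : String) (r : Int) :
    (let words := PySem.Str.split₀ line
     (PySem.List.pyRange 0 (PySem.List.len words)).foldl (fun result i =>
       let w := (PySem.List.pyGetD words i "").toList
       let signal :=
         (PySem.List.pyRange 0 (PySem.List.len w)).foldl (fun s j =>
           let c := PySem.List.pyGetD w j ' '
           if PySem.Chars.lowerChar c = 'a' then (s.1 + 1, s.2.1, s.2.2.1, s.2.2.2.1, s.2.2.2.2)
           else if PySem.Chars.lowerChar c = 'e' then (s.1, s.2.1 + 1, s.2.2.1, s.2.2.2.1, s.2.2.2.2)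
           else if PySem.Chars.lowerChar c = 'i' then (s.1, s.2.1, s.2.2.1 + 1, s.2.2.2.1, s.2.2.2.2)
           else if PySem.Chars.lowerChar c = 'o' then (s.1, s.2.1, s.2.2.1, s.2.2.2.1 + 1, s.2.2.2.2)
           else if PySem.Chars.lowerChar c = 'u' then (s.1, s.2.1, s.2.2.1, s.2.2.2.1, s.2.2.2.2 + 1)
           else s)
           (((0 : Int), (0 : Int), (0 : Int), (0 : Int), (0 : Int)))
       if signal.1 * signal.2.1 * signal.2.2.1 * signal.2.2.2.1 * signal.2.2.2.2 ≠ 0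
         then result + 1 else result)
       r)
    = r + ((PySem.Str.split₀ line).countP avcHasAllVowels : Int) := by
  simp only []
  rw [PySem.List.foldl_pyRange_pyGetD (PySem.Str.split₀ line) ""
        (fun result word =>
          let w := word.toList
          let signal :=
            (PySem.List.pyRange 0 (PySem.List.len w)).foldl (fun s j =>
              let c := PySem.List.pyGetD w j ' '
              if PySem.Chars.lowerChar c = 'a' then (s.1 + 1, s.2.1, s.2.2.1, s.2.2.2.1, s.2.2.2.2)
              else if PySem.Chars.lowerChar c = 'e' then (s.1, s.2.1 + 1, s.2.2.1, s.2.2.2.1, s.2.2.2.2)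
              else if PySem.Chars.lowerChar c = 'i' then (s.1, s.2.1, s.2.2.1 + 1, s.2.2.2.1, s.2.2.2.2)
              else if PySem.Chars.lowerChar c = 'o' then (s.1, s.2.1, s.2.2.1, s.2.2.2.1 + 1, s.2.2.2.2)
              else if PySem.Chars.lowerChar c = 'u' then (s.1, s.2.1, s.2.2.1, s.2.2.2.1, s.2.2.2.2 + 1)
              else s)
              (((0 : Int), (0 : Int), (0 : Int), (0 : Int), (0 : Int)))
          if signal.1 * signal.2.1 * signal.2.2.1 * signal.2.2.2.1 * signal.2.2.2.2 ≠ 0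
            then result + 1 else result)
        r (by norm_num)]
  simp only [Int.toNat_zero, List.drop_zero]
  have hstep : ∀ (result : Int) (word : String),
      (let w := word.toList
       let signal :=
         (PySem.List.pyRange 0 (PySem.List.len w)).foldl (fun s j =>
           let c := PySem.List.pyGetD w j ' '
           if PySem.Chars.lowerChar c = 'a' then (s.1 + 1, s.2.1, s.2.2.1, s.2.2.2.1, s.2.2.2.2)
           else if PySem.Chars.lowerChar c = 'e' then (s.1, s.2.1 + 1, s.2.2.1, s.2.2.2.1, s.2.2.2.2)
           else if PySem.Chars.lowerChar c = 'i' then (s.1, s.2.1, s.2.2.1 + 1, s.2.2.2.1, s.2.2.2.2)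
           else if PySem.Chars.lowerChar c = 'o' then (s.1, s.2.1, s.2.2.1, s.2.2.2.1 + 1, s.2.2.2.2)
           else if PySem.Chars.lowerChar c = 'u' then (s.1, s.2.1, s.2.2.1, s.2.2.2.1, s.2.2.2.2 + 1)
           else s)
           (((0 : Int), (0 : Int), (0 : Int), (0 : Int), (0 : Int)))
       if signal.1 * signal.2.1 * signal.2.2.1 * signal.2.2.2.1 * signal.2.2.2.2 ≠ 0
         then result + 1 else result)
      = if avcHasAllVowels word then result + 1 else result := by
    intro result word
    simp only []
    rw [PySem.List.foldl_pyRange_pyGetD word.toList ' '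
          (fun s c =>
            if PySem.Chars.lowerChar c = 'a' then (s.1 + 1, s.2.1, s.2.2.1, s.2.2.2.1, s.2.2.2.2)
            else if PySem.Chars.lowerChar c = 'e' then (s.1, s.2.1 + 1, s.2.2.1, s.2.2.2.1, s.2.2.2.2)
            else if PySem.Chars.lowerChar c = 'i' then (s.1, s.2.1, s.2.2.1 + 1, s.2.2.2.1, s.2.2.2.2)
            else if PySem.Chars.lowerChar c = 'o' then (s.1, s.2.1, s.2.2.1, s.2.2.2.1 + 1, s.2.2.2.2)
            else if PySem.Chars.lowerChar c = 'u' then (s.1, s.2.1, s.2.2.1, s.2.2.2.1, s.2.2.2.2 + 1)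
            else s)
          (((0 : Int), (0 : Int), (0 : Int), (0 : Int), (0 : Int))) (by norm_num)]
    simp only [Int.toNat_zero, List.drop_zero, avc_sig_fold, zero_add]
    have hw := avc_word word
    by_cases h : avcCnt 'a' word.toList * avcCnt 'e' word.toList * avcCnt 'i' word.toList *
        avcCnt 'o' word.toList * avcCnt 'u' word.toList ≠ 0
    · rw [if_pos h, if_pos (hw.mp h)]
    · rw [if_neg h, if_neg (fun ht => h (hw.mpr ht))]
  simp only [hstep]
  rw [PySem.List.foldl_count_if avcHasAllVowels (PySem.Str.split₀ line) r]

-- A's whole loop, with an arbitrary starting accumulator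
lemma avc_file (file : List String) (r : Int) :
    file.foldl (fun result line =>
    let words := PySem.Str.split₀ line
    (PySem.List.pyRange 0 (PySem.List.len words)).foldl (fun result i =>
      let w := (PySem.List.pyGetD words i "").toList
      let signal :=
        (PySem.List.pyRange 0 (PySem.List.len w)).foldl (fun s j =>
          let c := PySem.List.pyGetD w j ' '
          if PySem.Chars.lowerChar c = 'a' then (s.1 + 1, s.2.1, s.2.2.1, s.2.2.2.1, s.2.2.2.2)
          else if PySem.Chars.lowerChar c = 'e' then (s.1, s.2.1 + 1, s.2.2.1, s.2.2.2.1, s.2.2.2.2)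
          else if PySem.Chars.lowerChar c = 'i' then (s.1, s.2.1, s.2.2.1 + 1, s.2.2.2.1, s.2.2.2.2)
          else if PySem.Chars.lowerChar c = 'o' then (s.1, s.2.1, s.2.2.1, s.2.2.2.1 + 1, s.2.2.2.2)
          else if PySem.Chars.lowerChar c = 'u' then (s.1, s.2.1, s.2.2.1, s.2.2.2.1, s.2.2.2.2 + 1)
          else s)
          (((0 : Int), (0 : Int), (0 : Int), (0 : Int), (0 : Int)))
      if signal.1 * signal.2.1 * signal.2.2.1 * signal.2.2.2.1 * signal.2.2.2.2 ≠ 0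
        then result + 1 else result)
      result) r
    = r + ((file.flatMap (fun line => PySem.Str.split₀ line)).countP avcHasAllVowels : Int) := by
  induction file generalizing r with
  | nil => simp
  | cons line rest ih =>
    simp only [List.foldl_cons]
    rw [avc_line line r, ih]
    simp only [List.flatMap_cons, List.countP_append]
    push_cast
    ring

-- ===== VERDICT (by name: the statement is the Claim_ definition above) =====
theorem all_vowels_counter_spec : Claim_equal_all_vowels_counter := by
  intro file _
  show all_vowels_counter file = all_vowels_counter_alt file
  unfold all_vowels_counter
  rw [avc_file file 0]
  simp [all_vowels_counter_alt]
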